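-- pv_equiv track=rewrite | github.com/ShaojieJiang/orcheo | src/orcheo/nodes/evaluation/datasets.py | _filter_dataset
-- ===== SOURCE A (Python) =====
-- from typing import Any
--
-- def _filter_dataset(
--
--     dataset: list[dict[str, Any]],
--     split: str | None,
--     limit: int | None,
-- ) -> list[dict[str, Any]]:
--     filtered = dataset
--     if isinstance(split, str):
--         filtered = [row for row in filtered if row.get("split") == split]
--
--     if isinstance(limit, int) and limit > 0:
--         filtered = filtered[:limit]
--     return filtered
-- ===== SOURCE B (Python) =====
-- def _filter_dataset(
--     dataset,
--     split,
--     limit,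
-- ):
--     result = []
--     for row in dataset:
--         if isinstance(split, str) and row.get("split") != split:
--             continue
--         result.append(row)
--         if isinstance(limit, int) and limit > 0 and len(result) == limit:
--             break
--     return result
-- ===== Notes on version B (the rewrite author's own statement) =====
-- stated objective: alternative
-- what changed: Fuses A's filter-comprehension-then-slice into a single pass that appends matching rows and breaks as soon as the limit is reached.
import Mathlib
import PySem

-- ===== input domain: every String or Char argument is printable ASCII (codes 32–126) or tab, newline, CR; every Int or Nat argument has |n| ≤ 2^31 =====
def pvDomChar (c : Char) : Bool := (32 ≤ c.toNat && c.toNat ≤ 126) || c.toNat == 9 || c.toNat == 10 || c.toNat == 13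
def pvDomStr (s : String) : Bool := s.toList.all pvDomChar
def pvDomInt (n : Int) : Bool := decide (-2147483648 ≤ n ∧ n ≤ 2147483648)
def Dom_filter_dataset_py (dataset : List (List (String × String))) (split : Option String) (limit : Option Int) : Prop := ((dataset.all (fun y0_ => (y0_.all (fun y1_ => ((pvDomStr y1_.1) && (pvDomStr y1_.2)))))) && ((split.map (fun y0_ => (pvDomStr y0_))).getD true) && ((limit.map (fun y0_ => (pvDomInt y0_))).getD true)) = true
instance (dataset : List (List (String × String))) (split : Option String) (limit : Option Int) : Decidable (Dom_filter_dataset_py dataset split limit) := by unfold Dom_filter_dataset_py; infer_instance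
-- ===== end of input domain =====

-- B fuses A's filter-then-slice into a single pass with early exit at the limit (alternative decomposition; same complexity).

-- ===== PORT A =====
-- row.get("split"): first-match association-list lookup (PySem dict convention)
def filter_dataset_py (dataset : List (List (String × String))) (split : Option String) (limit : Option Int) : List (List (String × String)) :=
  let filtered := dataset
  let filtered := match split with
    | some s => filtered.filter (fun row => row.lookup "split" == some s)
    | none => filtered
  let filtered := match limit with
    | some l => if l > 0 then PySem.List.slice filtered none (some l) else filtered
    | none => filtered
  filtered

-- ===== PORT B =====
-- the fused loop of Source B: `count` is len(result) so far; `break` = stop recursing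
def hitLimit (limit : Option Int) (count : Int) : Bool :=
  match limit with | some l => decide (0 < l) && (count + 1 == l) | none => false

def altGo (split : Option String) (limit : Option Int) (count : Int) : List (List (String × String)) → List (List (String × String))
  | [] => []
  | row :: rest =>
    if (match split with | some s => !(row.lookup "split" == some s) | none => false) then
      altGo split limit count rest
    else
      if hitLimit limit count then
        [row]
      else
        row :: altGo split limit (count + 1) rest

def filter_dataset_py_alt (dataset : List (List (String × String))) (split : Option String) (limit : Option Int) : List (List (String × String)) :=
  altGo split limit 0 dataset

-- ===== PRECONDITION & SPEC =====
def Spec_filter_dataset_py (dataset : List (List (String × String))) (split : Option String) (limit : Option Int) (out : List (List (String × String))) : Prop := out = filter_dataset_py_alt dataset split limit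
instance (dataset : List (List (String × String))) (split : Option String) (limit : Option Int) (out : List (List (String × String))) : Decidable (Spec_filter_dataset_py dataset split limit out) := by unfold Spec_filter_dataset_py; infer_instance

-- ===== CLAIM (what is proved, stated in full; the proofs are below) =====
def Claim_equal_filter_dataset_py : Prop := ∀ (dataset : List (List (String × String))) (split : Option String) (limit : Option Int), Dom_filter_dataset_py dataset split limit → Spec_filter_dataset_py dataset split limit (filter_dataset_py dataset split limit)

-- ===== LEMMAS AND PROOFS =====

-- the row predicate both programs are about
def keepRow (split : Option String) : List (String × String) → Bool :=
  match split with
  | some s => fun row => row.lookup "split" == some s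
  | none => fun _ => true

theorem altGo_skip_iff (split : Option String) (row : List (String × String)) :
    (match split with | some s => !(row.lookup "split" == some s) | none => false) = !(keepRow split row) := by
  cases split <;> simp [keepRow]

-- with no effective limit, the fused loop is just a filter
theorem altGo_no_limit (split : Option String) (limit : Option Int)
    (h : match limit with | some l => l ≤ 0 | none => True) :
    ∀ (rows : List (List (String × String))) (count : Int),
      altGo split limit count rows = rows.filter (keepRow split) := by
  intro rows
  induction rows with
  | nil => intro count; rfl
  | cons row rest ih =>
    intro count
    have hlim : hitLimit limit count = false := by
      cases limit with
      | none => rfl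
      | some l => simp [hitLimit] at h ⊢; omega
    simp only [altGo, altGo_skip_iff, hlim]
    cases hk : keepRow split row <;> simp [hk, ih]

-- with an effective limit l and count kept so far (count < l), the loop is filter-then-take
theorem altGo_limit (split : Option String) (l : Int) (hl : 0 < l) :
    ∀ (rows : List (List (String × String))) (count : Int), count < l →
      altGo split (some l) count rows = (rows.filter (keepRow split)).take (l - count).toNat := by
  intro rows
  induction rows with
  | nil => intro count _; simp [altGo]
  | cons row rest ih =>
    intro count hc
    by_cases hfull : count + 1 = l
    · have hlim : hitLimit (some l) count = true := by simp [hitLimit]; omega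
      have htake : (l - count).toNat = 1 := by omega
      simp only [altGo, altGo_skip_iff, hlim]
      cases hk : keepRow split row with
      | false => simp [hk, ih count hc]
      | true => simp [hk, htake]
    · have hlim : hitLimit (some l) count = false := by simp [hitLimit]; omega
      have hc' : count + 1 < l := by omega
      have htake : (l - count).toNat = (l - (count + 1)).toNat + 1 := by omega
      simp only [altGo, altGo_skip_iff, hlim]
      cases hk : keepRow split row with
      | false => simp [hk, ih count hc]
      | true => simp [hk, ih (count + 1) hc', htake]

-- filtering with `none` keeps everything
theorem keepRow_none_filter (rows : List (List (String × String))) :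
    rows.filter (keepRow none) = rows := by
  simp [keepRow]

-- A equals filter-then-(optional)take in the same terms
theorem portA_eq (dataset : List (List (String × String))) (split : Option String) (limit : Option Int) :
    filter_dataset_py dataset split limit =
      match limit with
      | some l => if 0 < l then (dataset.filter (keepRow split)).take l.toNat
                  else dataset.filter (keepRow split)
      | none => dataset.filter (keepRow split) := by
  unfold filter_dataset_py
  cases split with
  | none =>
    cases limit with
    | none => simp [keepRow_none_filter]
    | some l =>
      by_cases hl : 0 < l
      · simp [hl, keepRow_none_filter, PySem.List.slice_to _ (le_of_lt hl)]
      · simp [hl, keepRow_none_filter]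
  | some s =>
    cases limit with
    | none => simp [keepRow]
    | some l =>
      by_cases hl : 0 < l
      · simp [hl, keepRow, PySem.List.slice_to _ (le_of_lt hl)]
      · simp [hl, keepRow]

-- ===== VERDICT (by name: the statement is the Claim_ definition above) =====
theorem filter_dataset_py_spec : Claim_equal_filter_dataset_py := by
  intro dataset split limit _
  unfold Spec_filter_dataset_py filter_dataset_py_alt
  rw [portA_eq]
  cases limit with
  | none => rw [altGo_no_limit split none trivial]
  | some l =>
    by_cases hl : 0 < l
    · rw [altGo_limit split l hl dataset 0 hl]
      simp [hl]
    · rw [altGo_no_limit split (some l) (by simpa using not_lt.mp hl)]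
      simp [hl]
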